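-- pv_equiv track=rewrite | github.com/camelia409/project | algorithms/ventilation_rules.py | wind_sides
-- ===== SOURCE A (Python) =====
-- from typing import Any, Dict, List, Optional, Set, Tuple
--
-- _WIND_INLET: Dict[str, List[str]] = {
--     "N":  ["N"],       "S":  ["S"],       "E":  ["E"],       "W":  ["W"],
--     "NE": ["N", "E"],  "NW": ["N", "W"],  "SE": ["S", "E"],  "SW": ["S", "W"],
-- }
--
-- OPPOSITE: Dict[str, str] = {"N": "S", "S": "N", "E": "W", "W": "E"}
--
-- def wind_sides(prevailing: str) -> Dict[str, str]:
--     """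
--     Classify each cardinal wall as 'windward', 'leeward', or 'side'
--     given the prevailing wind direction.
--
--     Returns {"N": "windward"|"leeward"|"side", "S": ..., "E": ..., "W": ...}
--     """
--     inlets = set(_WIND_INLET.get(prevailing, ["S", "E"]))
--     outlets = {OPPOSITE[d] for d in inlets if d in OPPOSITE}
--     result: Dict[str, str] = {}
--     for card in ("N", "S", "E", "W"):
--         if card in inlets:
--             result[card] = "windward"
--         elif card in outlets:
--             result[card] = "leeward"
--         else:
--             result[card] = "side"
--     return result
-- ===== SOURCE B (Python) =====
-- _SE_DEFAULT = {"N": "leeward", "S": "windward", "E": "windward", "W": "leeward"}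
--
-- RESULTS = {
--     "N":  {"N": "windward", "S": "leeward",  "E": "side",     "W": "side"},
--     "S":  {"N": "leeward",  "S": "windward", "E": "side",     "W": "side"},
--     "E":  {"N": "side",     "S": "side",     "E": "windward", "W": "leeward"},
--     "W":  {"N": "side",     "S": "side",     "E": "leeward",  "W": "windward"},
--     "NE": {"N": "windward", "S": "leeward",  "E": "windward", "W": "leeward"},
--     "NW": {"N": "windward", "S": "leeward",  "E": "leeward",  "W": "windward"},
--     "SE": {"N": "leeward",  "S": "windward", "E": "windward", "W": "leeward"},
--     "SW": {"N": "leeward",  "S": "windward", "E": "leeward",  "W": "windward"},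
-- }
--
-- def wind_sides(prevailing: str):
--     return dict(RESULTS.get(prevailing, _SE_DEFAULT))
-- ===== Notes on version B (the rewrite author's own statement) =====
-- stated objective: simpler
-- what changed: Replaces the inlet-set/opposite-set derivation and the four-way classification loop with a single lookup in a precomputed table of the 8 classifications (plus the S/E default), returned as a fresh dict.
import Mathlib
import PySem

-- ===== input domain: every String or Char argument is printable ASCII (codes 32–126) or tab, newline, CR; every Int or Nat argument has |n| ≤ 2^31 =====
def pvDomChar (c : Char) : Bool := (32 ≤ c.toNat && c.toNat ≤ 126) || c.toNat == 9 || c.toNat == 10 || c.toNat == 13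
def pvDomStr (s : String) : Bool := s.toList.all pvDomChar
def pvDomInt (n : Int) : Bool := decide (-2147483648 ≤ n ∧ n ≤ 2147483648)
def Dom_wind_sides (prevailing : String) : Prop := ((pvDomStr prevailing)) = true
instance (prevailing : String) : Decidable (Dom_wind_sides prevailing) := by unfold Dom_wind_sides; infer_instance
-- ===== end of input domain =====

-- B replaces A's inlet/outlet set derivation and four-way loop with one lookup in a
-- precomputed table of all 8 classifications (simpler; same cost).


-- ===== PORT A =====
def WIND_INLET : PySem.Dict String (List String) := PySem.Dict.ofList
  [("N", ["N"]), ("S", ["S"]), ("E", ["E"]), ("W", ["W"]),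
   ("NE", ["N", "E"]), ("NW", ["N", "W"]), ("SE", ["S", "E"]), ("SW", ["S", "W"])]

def OPPOSITE : PySem.Dict String String := PySem.Dict.ofList
  [("N", "S"), ("S", "N"), ("E", "W"), ("W", "E")]

def wind_sides (prevailing : String) : List (String × String) :=
  let inlets : PySem.Set String := PySem.Set.ofList (PySem.Dict.getD WIND_INLET prevailing ["S", "E"])
  let outlets : PySem.Set String :=
    inlets.foldl (fun acc d =>
      match PySem.Dict.get? OPPOSITE d with
      | some o => PySem.Set.add acc o
      | none => acc) PySem.Set.empty
  let result : PySem.Dict String String :=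
    ["N", "S", "E", "W"].foldl (fun res card =>
      if card ∈ inlets then PySem.Dict.insert res card "windward"
      else if card ∈ outlets then PySem.Dict.insert res card "leeward"
      else PySem.Dict.insert res card "side") PySem.Dict.empty
  result.items

-- ===== PORT B =====
def SE_DEFAULT : PySem.Dict String String := PySem.Dict.ofList
  [("N", "leeward"), ("S", "windward"), ("E", "windward"), ("W", "leeward")]

def RESULTS : PySem.Dict String (PySem.Dict String String) := PySem.Dict.ofList
  [("N",  PySem.Dict.ofList [("N", "windward"), ("S", "leeward"),  ("E", "side"),     ("W", "side")]),
   ("S",  PySem.Dict.ofList [("N", "leeward"),  ("S", "windward"), ("E", "side"),     ("W", "side")]),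
   ("E",  PySem.Dict.ofList [("N", "side"),     ("S", "side"),     ("E", "windward"), ("W", "leeward")]),
   ("W",  PySem.Dict.ofList [("N", "side"),     ("S", "side"),     ("E", "leeward"),  ("W", "windward")]),
   ("NE", PySem.Dict.ofList [("N", "windward"), ("S", "leeward"),  ("E", "windward"), ("W", "leeward")]),
   ("NW", PySem.Dict.ofList [("N", "windward"), ("S", "leeward"),  ("E", "leeward"),  ("W", "windward")]),
   ("SE", PySem.Dict.ofList [("N", "leeward"),  ("S", "windward"), ("E", "windward"), ("W", "leeward")]),
   ("SW", PySem.Dict.ofList [("N", "leeward"),  ("S", "windward"), ("E", "leeward"),  ("W", "windward")])]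

def wind_sides_alt (prevailing : String) : List (String × String) :=
  (PySem.Dict.getD RESULTS prevailing SE_DEFAULT).items

-- ===== PRECONDITION & SPEC =====
def Spec_wind_sides (prevailing : String) (out : List (String × String)) : Prop := out = wind_sides_alt prevailing
instance (prevailing : String) (out : List (String × String)) : Decidable (Spec_wind_sides prevailing out) := by unfold Spec_wind_sides; infer_instance

-- ===== CLAIM (what is proved, stated in full; the proofs are below) =====
def Claim_equal_wind_sides : Prop := ∀ (prevailing : String), Dom_wind_sides prevailing → Spec_wind_sides prevailing (wind_sides prevailing)

-- ===== LEMMAS AND PROOFS =====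

theorem pv_getD_WIND_INLET (p : String) (h1 : ¬ ("N":String) = p) (h2 : ¬ ("S":String) = p)
    (h3 : ¬ ("E":String) = p) (h4 : ¬ ("W":String) = p) (h5 : ¬ ("NE":String) = p)
    (h6 : ¬ ("NW":String) = p) (h7 : ¬ ("SE":String) = p) (h8 : ¬ ("SW":String) = p) :
    PySem.Dict.getD WIND_INLET p ["S", "E"] = ["S", "E"] := by
  have e : WIND_INLET = PySem.Dict.mk
      [("N", ["N"]), ("S", ["S"]), ("E", ["E"]), ("W", ["W"]),
       ("NE", ["N", "E"]), ("NW", ["N", "W"]), ("SE", ["S", "E"]), ("SW", ["S", "W"])] := by decide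
  rw [e, PySem.Dict.getD_eq_get?_getD]
  simp [PySem.Dict.get?, h1, h2, h3, h4, h5, h6, h7, h8]

theorem pv_getD_RESULTS (p : String) (h1 : ¬ ("N":String) = p) (h2 : ¬ ("S":String) = p)
    (h3 : ¬ ("E":String) = p) (h4 : ¬ ("W":String) = p) (h5 : ¬ ("NE":String) = p)
    (h6 : ¬ ("NW":String) = p) (h7 : ¬ ("SE":String) = p) (h8 : ¬ ("SW":String) = p) :
    PySem.Dict.getD RESULTS p SE_DEFAULT = SE_DEFAULT := by
  have e : RESULTS = PySem.Dict.mk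
      [("N",  PySem.Dict.ofList [("N", "windward"), ("S", "leeward"),  ("E", "side"),     ("W", "side")]),
       ("S",  PySem.Dict.ofList [("N", "leeward"),  ("S", "windward"), ("E", "side"),     ("W", "side")]),
       ("E",  PySem.Dict.ofList [("N", "side"),     ("S", "side"),     ("E", "windward"), ("W", "leeward")]),
       ("W",  PySem.Dict.ofList [("N", "side"),     ("S", "side"),     ("E", "leeward"),  ("W", "windward")]),
       ("NE", PySem.Dict.ofList [("N", "windward"), ("S", "leeward"),  ("E", "windward"), ("W", "leeward")]),
       ("NW", PySem.Dict.ofList [("N", "windward"), ("S", "leeward"),  ("E", "leeward"),  ("W", "windward")]),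
       ("SE", PySem.Dict.ofList [("N", "leeward"),  ("S", "windward"), ("E", "windward"), ("W", "leeward")]),
       ("SW", PySem.Dict.ofList [("N", "leeward"),  ("S", "windward"), ("E", "leeward"),  ("W", "windward")])] := by decide
  rw [e, PySem.Dict.getD_eq_get?_getD]
  simp [PySem.Dict.get?, h1, h2, h3, h4, h5, h6, h7, h8]

-- ===== VERDICT (by name: the statement is the Claim_ definition above) =====
theorem wind_sides_spec : Claim_equal_wind_sides := by
  intro p _
  unfold Spec_wind_sides
  by_cases h1 : ("N":String) = p; · subst h1; decide
  by_cases h2 : ("S":String) = p; · subst h2; decide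
  by_cases h3 : ("E":String) = p; · subst h3; decide
  by_cases h4 : ("W":String) = p; · subst h4; decide
  by_cases h5 : ("NE":String) = p; · subst h5; decide
  by_cases h6 : ("NW":String) = p; · subst h6; decide
  by_cases h7 : ("SE":String) = p; · subst h7; decide
  by_cases h8 : ("SW":String) = p; · subst h8; decide
  simp only [wind_sides, wind_sides_alt,
    pv_getD_WIND_INLET p h1 h2 h3 h4 h5 h6 h7 h8,
    pv_getD_RESULTS p h1 h2 h3 h4 h5 h6 h7 h8]
  decide
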